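-- pv_equiv track=rewrite | github.com/eric-d-culver/composting-simulation | anvil_calc.py | incompatible_enchants
-- ===== SOURCE A (Python) =====
-- incompatible_enchantments_data = [
--         ["Sharpness", "Smite", "Bane of Arthropods"],
--         ["Fortune", "Silk Touch"],
--         ["Protection", "Fire Protection", "Blast Protection", "Projectile Protection"],
--         ["Depth Strider", "Frost Walker"],
--         ["Infinity", "Mending"],
--         ["Multishot", "Piercing"],
--         ["Loyalty", "Riptide"],
--         ["Channeling", "Riptide"],
--         ["Silk Touch", "Looting"],
--         ["Silk Touch", "Luck of the Sea"]
-- ]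
--
-- def incompatible_enchants(enchant1, enchant2):
--     if enchant1 == enchant2:
--         return False # enchantment is always compatible with itself
--     incompatible = False
--     for category in incompatible_enchantments_data:
--         if enchant1 in category and enchant2 in category:
--             incompatible = True
--     return incompatible
-- ===== SOURCE B (Python) =====
-- incompatible_enchantments_data = [
--         ["Sharpness", "Smite", "Bane of Arthropods"],
--         ["Fortune", "Silk Touch"],
--         ["Protection", "Fire Protection", "Blast Protection", "Projectile Protection"],
--         ["Depth Strider", "Frost Walker"],
--         ["Infinity", "Mending"],
--         ["Multishot", "Piercing"],
--         ["Loyalty", "Riptide"],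
--         ["Channeling", "Riptide"],
--         ["Silk Touch", "Looting"],
--         ["Silk Touch", "Luck of the Sea"]
-- ]
--
-- # Precomputed at module load: every unordered pair of enchantments sharing a category.
-- incompatible_pairs = set()
-- for _category in incompatible_enchantments_data:
--     for _i in range(len(_category)):
--         for _j in range(_i + 1, len(_category)):
--             incompatible_pairs.add(frozenset((_category[_i], _category[_j])))
--
-- def incompatible_enchants(enchant1, enchant2):
--     return frozenset((enchant1, enchant2)) in incompatible_pairs
-- ===== Notes on version B (the rewrite author's own statement) =====
-- stated objective: idiomatic
-- what changed: The per-call scan over categories is replaced by one membership lookup in a set of unordered pairs precomputed once at module load; the equal-enchant branch disappears because a one-element frozenset can never equal a two-element pair key.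
import Mathlib
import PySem

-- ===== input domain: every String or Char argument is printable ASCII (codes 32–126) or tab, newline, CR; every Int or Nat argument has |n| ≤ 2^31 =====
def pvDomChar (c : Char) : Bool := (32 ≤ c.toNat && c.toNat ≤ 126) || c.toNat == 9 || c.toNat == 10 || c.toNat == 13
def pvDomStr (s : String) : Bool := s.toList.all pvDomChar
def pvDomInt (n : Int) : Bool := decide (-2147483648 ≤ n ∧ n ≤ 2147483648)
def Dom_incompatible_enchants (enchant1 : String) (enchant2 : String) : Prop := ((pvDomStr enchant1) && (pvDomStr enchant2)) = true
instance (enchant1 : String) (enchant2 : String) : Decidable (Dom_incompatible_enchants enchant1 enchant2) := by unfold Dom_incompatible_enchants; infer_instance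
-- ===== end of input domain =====

-- B replaces A's per-call scan over categories by one membership lookup in a
-- precomputed set of unordered incompatible pairs (idiomatic; same observable result).


-- ===== PORT A =====
def incompatible_enchantments_data : List (List String) := [
  ["Sharpness", "Smite", "Bane of Arthropods"],
  ["Fortune", "Silk Touch"],
  ["Protection", "Fire Protection", "Blast Protection", "Projectile Protection"],
  ["Depth Strider", "Frost Walker"],
  ["Infinity", "Mending"],
  ["Multishot", "Piercing"],
  ["Loyalty", "Riptide"],
  ["Channeling", "Riptide"],
  ["Silk Touch", "Looting"],
  ["Silk Touch", "Luck of the Sea"]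
]

def incompatible_enchants (enchant1 : String) (enchant2 : String) : Bool :=
  if enchant1 == enchant2 then false
  else
    incompatible_enchantments_data.foldl
      (fun incompatible category =>
        if category.contains enchant1 && category.contains enchant2 then true
        else incompatible)
      false

-- ===== PORT B =====
-- all unordered pairs (i < j) of a category, as Source B's double index loop builds them
def pvPairsOf (l : List String) : List (String × String) :=
  match l with
  | [] => []
  | x :: xs => xs.map (fun y => (x, y)) ++ pvPairsOf xs

-- precomputed once, like Source B's module-level set of frozensets
def incompatible_pairs : List (String × String) :=
  incompatible_enchantments_data.flatMap pvPairsOf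

-- frozenset((e1,e2)) == pair key p  ⇔  {e1,e2} = {p.1,p.2} as unordered pairs
def incompatible_enchants_alt (enchant1 : String) (enchant2 : String) : Bool :=
  incompatible_pairs.any (fun p =>
    (p.1 == enchant1 && p.2 == enchant2) || (p.1 == enchant2 && p.2 == enchant1))

-- ===== PRECONDITION & SPEC =====
def Spec_incompatible_enchants (enchant1 : String) (enchant2 : String) (out : Bool) : Prop := out = incompatible_enchants_alt enchant1 enchant2
instance (enchant1 : String) (enchant2 : String) (out : Bool) : Decidable (Spec_incompatible_enchants enchant1 enchant2 out) := by unfold Spec_incompatible_enchants; infer_instance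

-- ===== CLAIM (what is proved, stated in full; the proofs are below) =====
def Claim_equal_incompatible_enchants : Prop := ∀ (enchant1 : String) (enchant2 : String), Dom_incompatible_enchants enchant1 enchant2 → Spec_incompatible_enchants enchant1 enchant2 (incompatible_enchants enchant1 enchant2)

-- ===== LEMMAS AND PROOFS =====

-- A's foldl-with-flag over categories is 'any category satisfies'
theorem foldl_flag_eq_any (l : List (List String)) (b : Bool) (P : List String → Bool) :
    l.foldl (fun inc c => if P c then true else inc) b = (b || l.any P) := by
  induction l generalizing b with
  | nil => simp
  | cons c cs ih =>
    simp only [List.foldl_cons, List.any_cons, ih]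
    by_cases h : P c = true <;> simp [h]

-- per-category: the unordered-pair scan equals 'both members', for distinct names
theorem pairs_any_eq (e1 e2 : String) (h : e1 ≠ e2) (l : List String) :
    (pvPairsOf l).any (fun p =>
      (p.1 == e1 && p.2 == e2) || (p.1 == e2 && p.2 == e1))
    = (l.contains e1 && l.contains e2) := by
  induction l with
  | nil => simp [pvPairsOf]
  | cons x xs ih =>
    simp only [pvPairsOf, List.any_append, List.any_map, Function.comp_def, ih,
      List.contains_cons]
    rw [Bool.eq_iff_iff]
    simp only [Bool.or_eq_true, Bool.and_eq_true, List.any_eq_true, beq_iff_eq,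
      List.contains_eq_mem, decide_eq_true_eq]
    constructor
    · rintro (⟨y, hy, ⟨rfl, rfl⟩ | ⟨rfl, rfl⟩⟩ | ⟨h1, h2⟩)
      · exact ⟨Or.inl rfl, Or.inr hy⟩
      · exact ⟨Or.inr hy, Or.inl rfl⟩
      · exact ⟨Or.inr h1, Or.inr h2⟩
    · rintro ⟨rfl | h1, rfl | h2⟩
      · exact absurd rfl h
      · exact Or.inl ⟨e2, h2, Or.inl ⟨rfl, rfl⟩⟩
      · exact Or.inl ⟨e1, h1, Or.inr ⟨rfl, rfl⟩⟩
      · exact Or.inr ⟨h1, h2⟩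

-- no precomputed pair key has equal components (the categories are duplicate-free)
theorem pairs_irrefl : ∀ p ∈ incompatible_pairs, p.1 ≠ p.2 := by decide

-- ===== VERDICT (by name: the statement is the Claim_ definition above) =====
theorem incompatible_enchants_spec : Claim_equal_incompatible_enchants := by
  intro e1 e2 _
  unfold Spec_incompatible_enchants incompatible_enchants incompatible_enchants_alt
  by_cases h : e1 = e2
  · subst h
    simp only [beq_self_eq_true, if_true]
    symm
    rw [List.any_eq_false]
    intro p hp
    have := pairs_irrefl p hp
    simp only [Bool.or_eq_true, Bool.and_eq_true, beq_iff_eq, not_or, not_and]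
    constructor <;> intro h1 h2 <;> exact this (h1.trans h2.symm)
  · simp only [beq_eq_false_iff_ne.mpr h, Bool.false_eq_true, if_false]
    rw [foldl_flag_eq_any, Bool.false_or]
    unfold incompatible_pairs
    rw [List.any_flatMap]
    congr 1
    funext c
    exact (pairs_any_eq e1 e2 h c).symm
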